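-- pv_equiv track=rewrite | github.com/Tjeri/Advent-of-Code | 2019/day04.py | is_valid_2
-- ===== SOURCE A (Python) =====
-- def is_valid_2(password: int) -> bool:
--     str_pw = str(password)
--     last = None
--     digits: dict[str, int] = dict()
--     for char in str_pw:
--         digits[char] = digits.get(char, 0) + 1
--         if last is None:
--             last = char
--             continue
--         if last > char:
--             return False
--         last = char
--     return 2 in digits.values()
-- ===== SOURCE B (Python) =====
-- def is_valid_2(password: int) -> bool:
--     s = str(password)
--     if ''.join(sorted(s)) != s:
--         return False
--     return any(s.count(c) == 2 for c in set(s))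
-- ===== Notes on version B (the rewrite author's own statement) =====
-- stated objective: simpler
-- what changed: Replaces A's single interleaved scan (tracking last char while building a count dict with an early return) by two separate passes: the non-decreasing check via comparing the digit string with its sorted form, then a tally over the distinct characters asking for a count of exactly 2.
import Mathlib
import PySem

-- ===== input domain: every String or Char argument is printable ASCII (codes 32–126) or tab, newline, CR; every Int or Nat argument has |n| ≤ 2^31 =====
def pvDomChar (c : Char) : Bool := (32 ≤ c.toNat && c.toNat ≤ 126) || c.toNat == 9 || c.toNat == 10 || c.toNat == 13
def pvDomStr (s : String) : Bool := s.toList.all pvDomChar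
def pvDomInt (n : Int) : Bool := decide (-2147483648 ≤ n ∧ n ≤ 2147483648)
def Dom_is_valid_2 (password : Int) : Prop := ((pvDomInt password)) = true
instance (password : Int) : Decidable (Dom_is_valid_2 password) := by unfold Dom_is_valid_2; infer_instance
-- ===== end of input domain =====

-- B separates the two checks: non-decreasing order via comparing with the sorted string, then a tally
-- pass over the distinct characters — replacing A's single interleaved scan (objective: simpler).


-- ===== PORT A =====
-- the for-loop with its early 'return False': state = (last, digits)
def is_valid_2_go (chars : List Char) (last : Option Char) (digits : PySem.Dict Char Int) : Bool :=
  match chars with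
  | [] => digits.values.contains 2
  | char :: rest =>
    let digits' := digits.insert char (digits.getD char 0 + 1)
    match last with
    | none => is_valid_2_go rest (some char) digits'
    | some l => if l > char then false else is_valid_2_go rest (some char) digits'

def is_valid_2 (password : Int) : Bool :=
  is_valid_2_go (PySem.Int.toStr password).toList none PySem.Dict.empty

-- ===== PORT B =====
def is_valid_2_alt (password : Int) : Bool :=
  let s := (PySem.Int.toStr password).toList
  if PySem.List.sorted s (fun c => c) false ≠ s then false
  else (PySem.Set.ofList s).any (fun c => s.count c == 2)

-- ===== PRECONDITION & SPEC =====
def Spec_is_valid_2 (password : Int) (out : Bool) : Prop := out = is_valid_2_alt password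
instance (password : Int) (out : Bool) : Decidable (Spec_is_valid_2 password out) := by unfold Spec_is_valid_2; infer_instance

-- ===== CLAIM (what is proved, stated in full; the proofs are below) =====
def Claim_equal_is_valid_2 : Prop := ∀ (password : Int), Dom_is_valid_2 password → Spec_is_valid_2 password (is_valid_2 password)

-- ===== LEMMAS AND PROOFS =====

-- the order check carried by A's 'last' variable
def chainOK (last : Option Char) (chars : List Char) : Bool :=
  match chars with
  | [] => true
  | c :: rest =>
    match last with
    | none => chainOK (some c) rest
    | some l => if l > c then false else chainOK (some c) rest

lemma go_eq (chars : List Char) (last : Option Char) (d : PySem.Dict Char Int) :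
    is_valid_2_go chars last d =
      (chainOK last chars &&
        (chars.foldl (fun (d : PySem.Dict Char Int) x => d.insert x (d.getD x 0 + 1)) d).values.contains 2) := by
  induction chars generalizing last d with
  | nil => simp [is_valid_2_go, chainOK]
  | cons c rest ih =>
    cases last with
    | none => simp [is_valid_2_go, chainOK, ih]
    | some l =>
      by_cases h : l > c <;> simp [is_valid_2_go, chainOK, ih, h]

lemma chainOK_some_iff (l : Char) (chars : List Char) :
    chainOK (some l) chars = true ↔ List.IsChain (· ≤ ·) (l :: chars) := by
  induction chars generalizing l with
  | nil => simp [chainOK]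
  | cons c rest ih =>
    by_cases h : l > c
    · simp only [chainOK, if_pos h, List.isChain_cons_cons]
      exact iff_of_false (by simp) (fun hc => absurd hc.1 (not_le.2 h))
    · simp [chainOK, h, ih, List.isChain_cons_cons, le_of_not_gt h]

lemma chainOK_none_iff (chars : List Char) :
    chainOK none chars = true ↔ chars.Pairwise (· ≤ ·) := by
  rw [← List.isChain_iff_pairwise]
  cases chars with
  | nil => simp [chainOK]
  | cons c rest =>
    exact chainOK_some_iff c rest

lemma chainOK_eq_sorted (s : List Char) :
    chainOK none s = decide (PySem.List.sorted s (fun c => c) false = s) := by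
  by_cases h : s.Pairwise (· ≤ ·)
  · rw [(chainOK_none_iff s).2 h, PySem.List.sorted_eq_self_of_pairwise _ _ h]
    simp
  · have h1 : chainOK none s ≠ true := fun hc => h ((chainOK_none_iff s).1 hc)
    have h2 : PySem.List.sorted s (fun c => c) false ≠ s := fun he => by
      have := PySem.List.sorted_pairwise s (fun c => c) (κ := Char)
      rw [he] at this
      exact h this
    simp [h1, h2]

lemma values_counter_contains (s : List Char) :
    (s.foldl (fun (d : PySem.Dict Char Int) x => d.insert x (d.getD x 0 + 1)) PySem.Dict.empty).values.contains 2 =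
      (PySem.Set.ofList s).any (fun c => s.count c == 2) := by
  set d := s.foldl (fun (d : PySem.Dict Char Int) x => d.insert x (d.getD x 0 + 1)) PySem.Dict.empty with hd
  have hnd : d.keys.Nodup := by
    rw [hd]
    exact PySem.Dict.nodup_keys_foldl_insert s _ _ PySem.Dict.nodup_keys_empty
  have hkeys : d.keys = PySem.Set.ofList s := by
    rw [hd, PySem.Dict.keys_foldl_insert]
    simp [PySem.Dict.keys_empty, PySem.Set.update_nil_left]
  have hval : ∀ k : Char, d.getD k 0 = (s.count k : Int) := by
    intro k
    rw [hd, PySem.Dict.getD_foldl_insert_add_one]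
    simp
  rw [PySem.Dict.values_eq_map_keys d hnd 0, hkeys,
    List.map_congr_left (fun k _ => hval k)]
  induction (PySem.Set.ofList s : List Char) with
  | nil => simp
  | cons c rest ih =>
    simp only [List.map_cons, List.contains_cons, List.any_cons, ih]
    congr 1
    rw [Bool.eq_iff_iff]
    simp only [beq_iff_eq]
    omega

-- ===== VERDICT (by name: the statement is the Claim_ definition above) =====
theorem is_valid_2_spec : Claim_equal_is_valid_2 := by
  intro password _
  unfold Spec_is_valid_2 is_valid_2 is_valid_2_alt
  rw [go_eq, chainOK_eq_sorted, values_counter_contains]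
  simp only [ne_eq, ite_not]
  split <;> simp_all
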